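-- pv_equiv track=rewrite | github.com/wangsiji/DataStructure | JianZhiOffer/002_替换空格.py | replaceSpace
-- ===== SOURCE A (Python) =====
-- def replaceSpace(s):
--     # write code here
--     # 新数组
--     new_arr = []
--     for i in s:
--         if i == " ":
--             new_arr.append("%20")
--         else:
--             new_arr.append(i)
--     return "".join(new_arr)
-- ===== SOURCE B (Python) =====
-- def replaceSpace(s):
--     return "%20".join(s.split(" "))
-- ===== Notes on version B (the rewrite author's own statement) =====
-- stated objective: idiomatic
-- what changed: B splits the string on single-space delimiters and joins the segments with the percent-encoding of a space (two library passes) instead of A's character-by-character accumulate-and-append loop.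
import Mathlib
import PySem

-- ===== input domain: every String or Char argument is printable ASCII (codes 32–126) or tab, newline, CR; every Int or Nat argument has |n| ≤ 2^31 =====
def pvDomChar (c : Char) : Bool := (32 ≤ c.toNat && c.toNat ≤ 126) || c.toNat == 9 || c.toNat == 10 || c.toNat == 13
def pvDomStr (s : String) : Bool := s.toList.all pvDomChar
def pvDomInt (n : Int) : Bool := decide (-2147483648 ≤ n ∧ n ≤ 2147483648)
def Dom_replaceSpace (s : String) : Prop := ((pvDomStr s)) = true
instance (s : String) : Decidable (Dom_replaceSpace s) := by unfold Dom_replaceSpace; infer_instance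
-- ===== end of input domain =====

-- B replaces A's character-by-character accumulate loop with split-on-space + join-with-"%20" (idiomatic, same cost).

-- ===== PORT A =====
-- for i in s: append "%20" or i; "".join(new_arr)
def replaceSpace (s : String) : String :=
  let new_arr : List String :=
    s.toList.foldl (fun acc c => acc ++ [if c == ' ' then "%20" else String.ofList [c]]) []
  PySem.Str.join "" new_arr

-- ===== PORT B =====
-- "%20".join(s.split(" ")); split? is some here since the separator " " is nonempty
def replaceSpace_alt (s : String) : String :=
  PySem.Str.join "%20" ((PySem.Str.split? s " ").getD [])

-- ===== PRECONDITION & SPEC =====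
def Spec_replaceSpace (s : String) (out : String) : Prop := out = replaceSpace_alt s
instance (s : String) (out : String) : Decidable (Spec_replaceSpace s out) := by unfold Spec_replaceSpace; infer_instance

-- ===== CLAIM (what is proved, stated in full; the proofs are below) =====
def Claim_equal_replaceSpace : Prop := ∀ (s : String), Dom_replaceSpace s → Spec_replaceSpace s (replaceSpace s)

-- ===== LEMMAS AND PROOFS =====

-- the per-character expansion both programs realise
def pvExpand (c : Char) : List Char := if c == ' ' then ['%', '2', '0'] else [c]

-- reference recursion for splitOn with single-space separator (cur is the reversed current chunk)
def pvSplit (cur : List Char) : List Char → List (List Char)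
  | [] => [cur.reverse]
  | c :: rest => if c == ' ' then cur.reverse :: pvSplit [] rest else pvSplit (c :: cur) rest

theorem pvSplit_ne_nil (cur l : List Char) : pvSplit cur l ≠ [] := by
  induction l generalizing cur with
  | nil => simp [pvSplit]
  | cons c rest ih =>
    simp only [pvSplit]
    split
    · simp
    · exact ih _

theorem go_eq_pvSplit (fuel : Nat) (l cur : List Char) (acc : List (List Char))
    (h : l.length < fuel) :
    PySem.Chars.splitOn.go [' '] fuel l cur acc = acc.reverse ++ pvSplit cur l := by
  induction fuel generalizing l cur acc with
  | zero => omega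
  | succ fuel ih =>
    cases l with
    | nil => simp [PySem.Chars.splitOn.go, pvSplit]
    | cons c rest =>
      simp only [PySem.Chars.splitOn.go, List.isPrefixOf, pvSplit]
      by_cases hc : c == ' '
      · have hc' : (' ' == c) = true := by
          simp at hc; simp [hc]
        simp only [hc', Bool.true_and, hc]
        rw [ih _ _ _ (by simpa using Nat.lt_of_succ_lt_succ h)]
        simp
      · have hc' : (' ' == c) = false := by
          simp at hc ⊢; exact fun e => hc e.symm
        simp only [hc', Bool.false_and, Bool.false_eq_true, if_false, hc]
        exact ih _ _ _ (by simpa using Nat.lt_of_succ_lt_succ h)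

theorem splitOn_eq_pvSplit (l : List Char) :
    PySem.Chars.splitOn l [' '] = pvSplit [] l := by
  unfold PySem.Chars.splitOn
  simpa using go_eq_pvSplit (l.length + 1) l [] [] (by omega)

theorem join_pvSplit (l cur : List Char) :
    PySem.Chars.join ['%', '2', '0'] (pvSplit cur l) = cur.reverse ++ l.flatMap pvExpand := by
  induction l generalizing cur with
  | nil => simp [pvSplit, PySem.Chars.join_singleton]
  | cons c rest ih =>
    simp only [pvSplit, List.flatMap_cons]
    by_cases hc : c == ' '
    · rw [if_pos hc]
      obtain ⟨y, t, hyt⟩ : ∃ y t, pvSplit ([] : List Char) rest = y :: t := by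
        cases h : pvSplit ([] : List Char) rest with
        | nil => exact absurd h (pvSplit_ne_nil _ _)
        | cons y t => exact ⟨y, t, rfl⟩
      rw [hyt, PySem.Chars.join_cons_cons, ← hyt, ih]
      have : c = ' ' := by simpa using hc
      simp [this, pvExpand]
    · rw [if_neg hc, ih]
      have : (c == ' ') = false := by simpa using hc
      simp [pvExpand, this]

theorem foldl_map (l : List Char) :
    l.foldl (fun acc c => acc ++ [if c == ' ' then "%20" else String.ofList [c]]) ([] : List String)
      = l.map (fun c => if c == ' ' then "%20" else String.ofList [c]) := by
  rw [PySem.List.foldl_append_eq_flatMap (fun c => [if c == ' ' then "%20" else String.ofList [c]])]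
  induction l with
  | nil => rfl
  | cons c rest ih => simp_all

theorem join_nil_eq_flatten (parts : List (List Char)) :
    PySem.Chars.join [] parts = parts.flatten := by
  unfold PySem.Chars.join
  induction parts with
  | nil => rfl
  | cons x rest ih =>
    cases rest with
    | nil => rfl
    | cons y t => simp_all [List.intercalate, List.intersperse]

-- ===== VERDICT (by name: the statement is the Claim_ definition above) =====
theorem replaceSpace_spec : Claim_equal_replaceSpace := by
  intro s _
  show replaceSpace s = replaceSpace_alt s
  apply String.toList_inj.mp
  unfold replaceSpace replaceSpace_alt
  have hsplit : PySem.Str.split? s " " = some (((PySem.Chars.splitOn s.toList [' ']).map String.ofList)) := by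
    simp [PySem.Str.split?, PySem.Chars.split?]
  rw [hsplit]
  simp only [Option.getD_some, PySem.Str.toList_join, foldl_map]
  rw [show ("" : String).toList = [] from rfl, join_nil_eq_flatten]
  simp only [List.map_map, Function.comp_def, String.toList_ofList, List.map_id']
  rw [splitOn_eq_pvSplit, show ("%20" : String).toList = ['%', '2', '0'] from rfl, join_pvSplit]
  rw [List.flatten_eq_flatMap, List.flatMap_map]
  simp only [List.reverse_nil, List.nil_append]
  apply List.flatMap_congr
  intro c _
  by_cases hc : c == ' ' <;> simp [pvExpand, hc]
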